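-- pv_equiv track=rewrite | github.com/Manishsv/air-pollution | tools/ai_dev_supervisor/domain_maturity_probe.py | _stage_for_missing
-- ===== SOURCE A (Python) =====
-- def _stage_for_missing(missing: list[str]) -> str:
--     if not missing:
--         return "complete_read_only_vertical_slice"
--
--     has_specs_missing = any(
--         p.startswith("specifications/domain_specs/") for p in missing
--     )
--     has_contracts_missing = any(
--         p.startswith("specifications/provider_contracts/")
--         or p.startswith("specifications/consumer_contracts/")
--         for p in missing
--     )
--     has_examples_missing = any(p.startswith("specifications/examples/") for p in missing)
--
--     if has_specs_missing or has_contracts_missing: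
--         return "incomplete_specs"
--     if has_examples_missing:
--         return "specs_present_missing_examples"
--
--     has_impl_missing = any(
--         p.startswith("urban_platform/") or p.startswith("review_dashboard/")
--         for p in missing
--     )
--     if has_impl_missing:
--         return "specs_ready_missing_implementation"
--
--     has_tests_missing = any(p.startswith("tests/") for p in missing)
--     if has_tests_missing:
--         return "implementation_ready_missing_tests"
--
--     return "partial"
-- ===== SOURCE B (Python) =====
-- _STAGES = [
--     "incomplete_specs",
--     "specs_present_missing_examples",
--     "specs_ready_missing_implementation",
--     "implementation_ready_missing_tests",
--     "partial",
-- ]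
--
--
-- def _rank(p: str) -> int:
--     if (p.startswith("specifications/domain_specs/")
--             or p.startswith("specifications/provider_contracts/")
--             or p.startswith("specifications/consumer_contracts/")):
--         return 0
--     if p.startswith("specifications/examples/"):
--         return 1
--     if p.startswith("urban_platform/") or p.startswith("review_dashboard/"):
--         return 2
--     if p.startswith("tests/"):
--         return 3
--     return 4
--
--
-- def _stage_for_missing(missing: list[str]) -> str:
--     if not missing:
--         return "complete_read_only_vertical_slice"
--     return _STAGES[min(_rank(p) for p in missing)]
-- ===== Notes on version B (the rewrite author's own statement) =====
-- stated objective: simpler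
-- what changed: Replaces five sequential any() scans and an early-return chain with a per-path priority rank helper, a single min over the list, and indexing a fixed stage table.
import Mathlib
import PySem

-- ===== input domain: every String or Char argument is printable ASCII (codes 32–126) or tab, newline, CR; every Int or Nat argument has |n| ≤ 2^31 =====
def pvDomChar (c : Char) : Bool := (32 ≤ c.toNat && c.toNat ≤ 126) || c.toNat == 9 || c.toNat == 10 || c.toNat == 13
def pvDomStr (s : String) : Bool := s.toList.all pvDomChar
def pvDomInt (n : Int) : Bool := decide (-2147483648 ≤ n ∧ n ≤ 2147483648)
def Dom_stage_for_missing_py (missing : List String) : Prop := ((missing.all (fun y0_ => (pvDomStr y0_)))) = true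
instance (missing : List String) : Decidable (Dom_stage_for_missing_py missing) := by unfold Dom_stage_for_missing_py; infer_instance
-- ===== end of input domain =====

-- B replaces A's five sequential any() scans and early-return chain by a per-path
-- priority rank, a single min over the list and a fixed stage table (objective: simpler).

-- ===== PORT A =====
def stage_for_missing_py (missing : List String) : String :=
  if missing = [] then "complete_read_only_vertical_slice"
  else
    let has_specs_missing := missing.any (fun p => PySem.Str.startswith p "specifications/domain_specs/")
    let has_contracts_missing := missing.any (fun p =>
      PySem.Str.startswith p "specifications/provider_contracts/" ||
      PySem.Str.startswith p "specifications/consumer_contracts/")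
    let has_examples_missing := missing.any (fun p => PySem.Str.startswith p "specifications/examples/")
    if has_specs_missing || has_contracts_missing then "incomplete_specs"
    else if has_examples_missing then "specs_present_missing_examples"
    else
      let has_impl_missing := missing.any (fun p =>
        PySem.Str.startswith p "urban_platform/" || PySem.Str.startswith p "review_dashboard/")
      if has_impl_missing then "specs_ready_missing_implementation"
      else
        let has_tests_missing := missing.any (fun p => PySem.Str.startswith p "tests/")
        if has_tests_missing then "implementation_ready_missing_tests"
        else "partial"

-- ===== PORT B =====
def pvStages : List String :=
  ["incomplete_specs", "specs_present_missing_examples",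
   "specs_ready_missing_implementation", "implementation_ready_missing_tests", "partial"]

def pvRank (p : String) : Nat :=
  if PySem.Str.startswith p "specifications/domain_specs/" ||
     PySem.Str.startswith p "specifications/provider_contracts/" ||
     PySem.Str.startswith p "specifications/consumer_contracts/" then 0
  else if PySem.Str.startswith p "specifications/examples/" then 1
  else if PySem.Str.startswith p "urban_platform/" ||
          PySem.Str.startswith p "review_dashboard/" then 2
  else if PySem.Str.startswith p "tests/" then 3
  else 4

def stage_for_missing_py_alt (missing : List String) : String :=
  match missing with
  | [] => "complete_read_only_vertical_slice"
  | p :: rest =>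
    -- Python's min over the nonempty generator: fold of min with the head's rank as start
    pvStages.getD (rest.foldl (fun a q => min a (pvRank q)) (pvRank p)) "partial"

-- ===== PRECONDITION & SPEC =====
def Spec_stage_for_missing_py (missing : List String) (out : String) : Prop := out = stage_for_missing_py_alt missing
instance (missing : List String) (out : String) : Decidable (Spec_stage_for_missing_py missing out) := by unfold Spec_stage_for_missing_py; infer_instance

-- ===== CLAIM (what is proved, stated in full; the proofs are below) =====
def Claim_equal_stage_for_missing_py : Prop := ∀ (missing : List String), Dom_stage_for_missing_py missing → Spec_stage_for_missing_py missing (stage_for_missing_py missing)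

-- ===== LEMMAS AND PROOFS =====

theorem pvRank_le (p : String) : pvRank p ≤ 4 := by
  unfold pvRank; split_ifs <;> omega

theorem pv_foldmin (l : List String) (i : Nat) (hi : i ≤ 4) :
    l.foldl (fun a q => min a (pvRank q)) i =
      if l.any (fun q => pvRank q == 0) then 0
      else if l.any (fun q => pvRank q == 1) then min i 1
      else if l.any (fun q => pvRank q == 2) then min i 2
      else if l.any (fun q => pvRank q == 3) then min i 3
      else i := by
  induction l generalizing i with
  | nil => simp
  | cons p rest ih =>
    have hr : pvRank p ≤ 4 := pvRank_le p
    simp only [List.foldl_cons, List.any_cons]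
    rw [ih (min i (pvRank p)) (by omega)]
    have hc : pvRank p = 0 ∨ pvRank p = 1 ∨ pvRank p = 2 ∨ pvRank p = 3 ∨ pvRank p = 4 := by omega
    rcases hc with h | h | h | h | h <;> (simp only [h]; simp) <;> split_ifs <;> omega


theorem pv_any_or {α : Type} (l : List α) (f g : α → Bool) :
    (l.any f || l.any g) = l.any (fun x => f x || g x) := by
  induction l with
  | nil => rfl
  | cons a t ih =>
    simp only [List.any_cons, ← ih]
    cases f a <;> cases g a <;> simp

theorem pv_any_congr_mem {α : Type} (l : List α) (f g : α → Bool)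
    (h : ∀ x ∈ l, f x = g x) : l.any f = l.any g := by
  induction l with
  | nil => rfl
  | cons a t ih => simp_all


theorem pvRank1_char (x : String) (h : pvRank x ≠ 0) :
    (pvRank x == 1) = PySem.Str.startswith x "specifications/examples/" := by
  unfold pvRank at h ⊢; split_ifs with ha hb hc hd <;> simp_all

theorem pvRank2_char (x : String) (h0 : pvRank x ≠ 0) (h1 : pvRank x ≠ 1) :
    (pvRank x == 2) = (PySem.Str.startswith x "urban_platform/" ||
      PySem.Str.startswith x "review_dashboard/") := by
  unfold pvRank at h0 h1 ⊢; split_ifs with ha hb hc hd <;> simp_all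

theorem pvRank3_char (x : String) (h0 : pvRank x ≠ 0) (h1 : pvRank x ≠ 1) (h2 : pvRank x ≠ 2) :
    (pvRank x == 3) = PySem.Str.startswith x "tests/" := by
  unfold pvRank at h0 h1 h2 ⊢; split_ifs with ha hb hc hd <;> simp_all

-- ===== VERDICT (by name: the statement is the Claim_ definition above) =====
theorem stage_for_missing_py_spec : Claim_equal_stage_for_missing_py := by
  intro missing _
  unfold Spec_stage_for_missing_py
  cases missing with
  | nil => rfl
  | cons p rest =>
    unfold stage_for_missing_py stage_for_missing_py_alt
    simp only [reduceCtorEq, if_false]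
    have hswap : rest.foldl (fun a q => min a (pvRank q)) (pvRank p) =
        (p :: rest).foldl (fun a q => min a (pvRank q)) 4 := by
      simp [List.foldl_cons, Nat.min_eq_right (pvRank_le p)]
    rw [hswap, pv_foldmin (p :: rest) 4 (le_refl 4)]
    rw [pv_any_or]
    by_cases h0 : ((p :: rest).any (fun q =>
        PySem.Str.startswith q "specifications/domain_specs/" ||
        (PySem.Str.startswith q "specifications/provider_contracts/" ||
         PySem.Str.startswith q "specifications/consumer_contracts/"))) = true
    · -- some rank-0 path: both return "incomplete_specs"
      have hb0 : ((p :: rest).any (fun q => pvRank q == 0)) = true := by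
        obtain ⟨x, hx, hfx⟩ := List.any_eq_true.mp h0
        refine List.any_eq_true.mpr ⟨x, hx, ?_⟩
        unfold pvRank
        simp only [Bool.or_eq_true] at hfx
        rcases hfx with h | h | h <;>
          · rw [if_pos (by simp only [h, Bool.true_or, Bool.or_true])]; rfl
      rw [if_pos h0, if_pos hb0]
      rfl
    · have hr0 : ∀ x ∈ p :: rest, pvRank x ≠ 0 := by
        intro x hx hc
        unfold pvRank at hc
        split_ifs at hc with h1 h2 h3 h4
        refine h0 (List.any_eq_true.mpr ⟨x, hx, ?_⟩)
        simp only [Bool.or_eq_true] at h1 ⊢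
        rcases h1 with (h | h) | h
        · exact Or.inl h
        · exact Or.inr (Or.inl h)
        · exact Or.inr (Or.inr h)
      have hb0 : ((p :: rest).any (fun q => pvRank q == 0)) = false := by
        rw [List.any_eq_false]; intro x hx; simpa using hr0 x hx
      have h1eq : ((p :: rest).any (fun q => pvRank q == 1)) =
          ((p :: rest).any (fun q => PySem.Str.startswith q "specifications/examples/")) :=
        pv_any_congr_mem _ _ _ (fun x hx => pvRank1_char x (hr0 x hx))
      by_cases h1 : ((p :: rest).any (fun q => PySem.Str.startswith q "specifications/examples/")) = true
      · have hb1 : ((p :: rest).any (fun q => pvRank q == 1)) = true := h1eq.trans h1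
        have hn0 : ¬ ((p :: rest).any (fun q => pvRank q == 0)) = true := by
          rw [hb0]; exact Bool.false_ne_true
        rw [if_neg h0, if_pos h1, if_neg hn0, if_pos hb1]
        rfl
      · have hr01 : ∀ x ∈ p :: rest, pvRank x ≠ 0 ∧ pvRank x ≠ 1 := by
          intro x hx
          refine ⟨hr0 x hx, ?_⟩
          intro hc
          refine h1 (List.any_eq_true.mpr ⟨x, hx, ?_⟩)
          unfold pvRank at hc
          split_ifs at hc with ha hb hcc hd <;> omega
        have hb1 : ((p :: rest).any (fun q => pvRank q == 1)) = false := by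
          rw [List.any_eq_false]; intro x hx; simpa using (hr01 x hx).2
        have h2eq : ((p :: rest).any (fun q => pvRank q == 2)) =
            ((p :: rest).any (fun q => PySem.Str.startswith q "urban_platform/" ||
              PySem.Str.startswith q "review_dashboard/")) :=
          pv_any_congr_mem _ _ _ (fun x hx => pvRank2_char x (hr01 x hx).1 (hr01 x hx).2)
        by_cases h2 : ((p :: rest).any (fun q => PySem.Str.startswith q "urban_platform/" ||
            PySem.Str.startswith q "review_dashboard/")) = true
        · have hb2 : ((p :: rest).any (fun q => pvRank q == 2)) = true := h2eq.trans h2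
          have hn0 : ¬ ((p :: rest).any (fun q => pvRank q == 0)) = true := by
            rw [hb0]; exact Bool.false_ne_true
          have hn1 : ¬ ((p :: rest).any (fun q => pvRank q == 1)) = true := by
            rw [hb1]; exact Bool.false_ne_true
          rw [if_neg h0, if_neg h1, if_pos h2, if_neg hn0, if_neg hn1, if_pos hb2]
          rfl
        · have hr012 : ∀ x ∈ p :: rest, pvRank x ≠ 0 ∧ pvRank x ≠ 1 ∧ pvRank x ≠ 2 := by
            intro x hx
            refine ⟨(hr01 x hx).1, (hr01 x hx).2, ?_⟩
            intro hc
            refine h2 (List.any_eq_true.mpr ⟨x, hx, ?_⟩)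
            unfold pvRank at hc
            split_ifs at hc with ha hb hcc hd <;> omega
          have hb2 : ((p :: rest).any (fun q => pvRank q == 2)) = false := by
            rw [List.any_eq_false]; intro x hx; simpa using (hr012 x hx).2.2
          have h3eq : ((p :: rest).any (fun q => pvRank q == 3)) =
              ((p :: rest).any (fun q => PySem.Str.startswith q "tests/")) :=
            pv_any_congr_mem _ _ _
              (fun x hx => pvRank3_char x (hr012 x hx).1 (hr012 x hx).2.1 (hr012 x hx).2.2)
          by_cases h3 : ((p :: rest).any (fun q => PySem.Str.startswith q "tests/")) = true
          · have hb3 : ((p :: rest).any (fun q => pvRank q == 3)) = true := h3eq.trans h3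
            have hn0 : ¬ ((p :: rest).any (fun q => pvRank q == 0)) = true := by
              rw [hb0]; exact Bool.false_ne_true
            have hn1 : ¬ ((p :: rest).any (fun q => pvRank q == 1)) = true := by
              rw [hb1]; exact Bool.false_ne_true
            have hn2 : ¬ ((p :: rest).any (fun q => pvRank q == 2)) = true := by
              rw [hb2]; exact Bool.false_ne_true
            rw [if_neg h0, if_neg h1, if_neg h2, if_pos h3, if_neg hn0, if_neg hn1, if_neg hn2, if_pos hb3]
            rfl
          · have hb3 : ((p :: rest).any (fun q => pvRank q == 3)) = false := by
              have hnot3 : ∀ x ∈ p :: rest, pvRank x ≠ 3 := by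
                intro x hx hc
                refine h3 (List.any_eq_true.mpr ⟨x, hx, ?_⟩)
                unfold pvRank at hc
                split_ifs at hc with ha hb hcc hd <;> omega
              rw [List.any_eq_false]; intro x hx; simpa using hnot3 x hx
            have hn0 : ¬ ((p :: rest).any (fun q => pvRank q == 0)) = true := by
              rw [hb0]; exact Bool.false_ne_true
            have hn1 : ¬ ((p :: rest).any (fun q => pvRank q == 1)) = true := by
              rw [hb1]; exact Bool.false_ne_true
            have hn2 : ¬ ((p :: rest).any (fun q => pvRank q == 2)) = true := by
              rw [hb2]; exact Bool.false_ne_true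
            have hn3 : ¬ ((p :: rest).any (fun q => pvRank q == 3)) = true := by
              rw [hb3]; exact Bool.false_ne_true
            rw [if_neg h0, if_neg h1, if_neg h2, if_neg h3, if_neg hn0, if_neg hn1, if_neg hn2, if_neg hn3]
            rfl
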